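-- pv_equiv track=rewrite | github.com/jake20001/Hello | everydays/InterviewExmas/Medium/3.py | getAx
-- ===== SOURCE A (Python) =====
-- def getAx(max_pre,x,nums):
--     s = 0
--     isBegin = False
--     ax = []
--     for n in nums:
--         if s==max_pre:
--             break
--         if n==x:
--             isBegin = True
--         if isBegin:
--             s = s + n
--             ax.append(n)
--     return ax
-- ===== SOURCE B (Python) =====
-- def getAx(max_pre, x, nums):
--     if x not in nums:
--         return []
--     tail = nums[nums.index(x):]
--     sums = [0]
--     for n in tail:
--         sums.append(sums[-1] + n)
--     cut = next((i for i in range(len(tail)) if sums[i] == max_pre), len(tail))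
--     return tail[:cut]
-- ===== Notes on version B (the rewrite author's own statement) =====
-- stated objective: alternative
-- what changed: B replaces A's single stateful flag-and-break loop by staged passes: slice the tail at the first x, build the full prefix-sum table of the tail, search that table for the first index whose prefix sum equals max_pre, and return tail[:cut]; the max_pre==0 case needs no guard since sums[0]==0.
import Mathlib
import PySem

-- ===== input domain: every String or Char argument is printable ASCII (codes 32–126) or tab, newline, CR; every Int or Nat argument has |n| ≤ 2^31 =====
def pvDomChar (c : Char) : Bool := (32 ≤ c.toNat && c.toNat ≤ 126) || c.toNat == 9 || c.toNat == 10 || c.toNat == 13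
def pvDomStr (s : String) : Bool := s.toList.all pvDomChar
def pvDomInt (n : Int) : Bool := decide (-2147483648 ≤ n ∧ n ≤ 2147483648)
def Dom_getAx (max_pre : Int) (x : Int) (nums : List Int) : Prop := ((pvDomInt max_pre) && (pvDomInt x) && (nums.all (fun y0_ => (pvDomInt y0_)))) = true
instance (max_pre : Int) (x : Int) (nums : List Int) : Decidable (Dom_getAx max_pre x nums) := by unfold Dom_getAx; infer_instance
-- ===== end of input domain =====

-- B recasts A's flag-and-break loop as staged passes: slice at the first x, build the full prefix-sum table, find the cut index, slice (objective: alternative).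


-- ===== PORT A =====
-- A's for-loop with break, state (s, isBegin, ax)
def getAxLoop (m x : Int) : List Int → Int → Bool → List Int → List Int
  | [], _, _, ax => ax
  | n :: t, s, b, ax =>
    if s = m then ax
    else
      let b' := if n = x then true else b
      if b' then getAxLoop m x t (s + n) b' (ax ++ [n])
      else getAxLoop m x t s b' ax

def getAx (max_pre : Int) (x : Int) (nums : List Int) : List Int :=
  getAxLoop max_pre x nums 0 false []

-- ===== PORT B =====
-- B's prefix-sum pass: sums.append(sums[-1] + n) for each n of tail
def getAxSums : List Int → List Int → List Int
  | [], sums => sums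
  | n :: t, sums => getAxSums t (sums ++ [sums.getLast! + n])

def getAx_alt (max_pre : Int) (x : Int) (nums : List Int) : List Int :=
  -- 'if x not in nums: return []' + 'nums.index(x)' ported as one match on index?
  match PySem.List.index? nums x with
  | none => []
  | some i =>
    let tail := nums.drop i            -- nums[start:] with the nonnegative .index result
    let sums := getAxSums tail [0]
    -- next((i for i in range(len(tail)) if sums[i] == max_pre), len(tail))
    let cut := ((List.range tail.length).find? (fun j => sums.getD j 0 = max_pre)).getD tail.length
    tail.take cut

-- ===== PRECONDITION & SPEC =====
def Spec_getAx (max_pre : Int) (x : Int) (nums : List Int) (out : List Int) : Prop := out = getAx_alt max_pre x nums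
instance (max_pre : Int) (x : Int) (nums : List Int) (out : List Int) : Decidable (Spec_getAx max_pre x nums out) := by unfold Spec_getAx; infer_instance

-- ===== CLAIM (what is proved, stated in full; the proofs are below) =====
def Claim_equal_getAx : Prop := ∀ (max_pre : Int) (x : Int) (nums : List Int), Dom_getAx max_pre x nums → Spec_getAx max_pre x nums (getAx max_pre x nums)

-- ===== LEMMAS AND PROOFS =====

-- B's core pipeline applied to a tail and a starting sum
def bCore (m : Int) (tail : List Int) (s : Int) : List Int :=
  tail.take (((List.range tail.length).find? (fun j => (getAxSums tail [s]).getD j 0 = m)).getD tail.length)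

theorem getAxSums_append (t : List Int) : ∀ (p : List Int) (a : Int),
    getAxSums t (p ++ [a]) = p ++ getAxSums t [a] := by
  induction t with
  | nil => intro p a; rfl
  | cons n t ih =>
    intro p a
    have hl : (p ++ [a]).getLast! = a := by
      simp
    have hl1 : ([a] : List Int).getLast! = a := rfl
    simp only [getAxSums, hl, hl1]
    rw [show p ++ [a] ++ [a + n] = (p ++ [a]) ++ [a + n] from rfl,
       ih (p ++ [a]) (a + n), ih [a] (a + n)]
    simp

theorem bCore_cons (m n : Int) (t : List Int) (s : Int) :
    bCore m (n :: t) s = if s = m then [] else n :: bCore m t (s + n) := by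
  have h1 : ([s] : List Int).getLast! = s := rfl
  have hsums : getAxSums (n :: t) [s] = s :: getAxSums t [s + n] := by
    simp only [getAxSums, h1]
    exact getAxSums_append t [s] (s + n)
  unfold bCore
  rw [hsums, List.length_cons, List.range_succ_eq_map]
  by_cases hs : s = m
  · rw [List.find?_cons_of_pos (by simp [hs])]
    simp [hs]
  · rw [List.find?_cons_of_neg (by simp [hs]), List.find?_map]
    have hpred : ((fun j => decide ((s :: getAxSums t [s + n]).getD j 0 = m)) ∘ Nat.succ)
        = fun j => decide ((getAxSums t [s + n]).getD j 0 = m) := by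
      funext j; simp
    rw [hpred, if_neg hs]
    cases hf : (List.range t.length).find? (fun j => decide ((getAxSums t [s + n]).getD j 0 = m)) with
    | none => simp
    | some j => simp

theorem bCore_nil (m s : Int) : bCore m [] s = [] := rfl

-- once isBegin is true, A's loop computes ax ++ B's core pipeline
theorem getAxLoop_true (m x : Int) : ∀ (t : List Int) (s : Int) (ax : List Int),
    getAxLoop m x t s true ax = ax ++ bCore m t s := by
  intro t
  induction t with
  | nil => intro s ax; simp [getAxLoop, bCore_nil]
  | cons n t ih =>
    intro s ax
    rw [bCore_cons]
    simp only [getAxLoop]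
    by_cases h : s = m
    · simp [h]
    · simp [h, ih]

-- before x appears (and with m ≠ 0), A's loop just skips
theorem getAxLoop_skip (m x : Int) (hm : m ≠ 0) : ∀ (pre rest : List Int), x ∉ pre →
    getAxLoop m x (pre ++ rest) 0 false [] = getAxLoop m x rest 0 false [] := by
  intro pre
  induction pre with
  | nil => intro rest _; rfl
  | cons n p ih =>
    intro rest hmem
    have hn : n ≠ x := fun h => hmem (by simp [h])
    have h0 : (0 : Int) ≠ m := fun h => hm h.symm
    simp only [List.cons_append, getAxLoop, if_neg h0, if_neg hn]
    exact ih rest (fun h => hmem (List.mem_cons_of_mem _ h))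

-- if x never appears (and m ≠ 0), A returns []
theorem getAxLoop_none (m x : Int) (hm : m ≠ 0) : ∀ (t : List Int), x ∉ t →
    getAxLoop m x t 0 false [] = [] := by
  intro t
  induction t with
  | nil => intro _; rfl
  | cons n p ih =>
    intro hmem
    have hn : n ≠ x := fun h => hmem (by simp [h])
    have h0 : (0 : Int) ≠ m := fun h => hm h.symm
    simp only [getAxLoop, if_neg h0, if_neg hn]
    exact ih (fun h => hmem (List.mem_cons_of_mem _ h))

-- ===== VERDICT (by name: the statement is the Claim_ definition above) =====
theorem getAx_spec : Claim_equal_getAx := by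
  intro m x nums _
  unfold Spec_getAx getAx getAx_alt
  cases hidx : PySem.List.index? nums x with
  | none =>
    have hx : x ∉ nums := (PySem.List.index?_eq_none_iff nums x).mp hidx
    by_cases hm : m = 0
    · subst hm
      cases nums with
      | nil => rfl
      | cons n t =>
        have hn : n ≠ x := fun h => hx (by simp [h])
        simp [getAxLoop]
    · exact getAxLoop_none m x hm nums hx
  | some i =>
    obtain ⟨pre, suf, hnums, hlen, hxpre⟩ := (PySem.List.index?_eq_some_iff nums x i).mp hidx
    subst hnums
    have hdrop : (pre ++ x :: suf).drop i = x :: suf := by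
      subst hlen; simp
    show getAxLoop m x (pre ++ x :: suf) 0 false [] = bCore m ((pre ++ x :: suf).drop i) 0
    rw [hdrop]
    by_cases hm : m = 0
    · subst hm
      rw [bCore_cons]
      cases pre with
      | nil => simp [getAxLoop]
      | cons n p => simp [getAxLoop]
    · have h0 : (0 : Int) ≠ m := fun h => hm h.symm
      rw [getAxLoop_skip m x hm pre (x :: suf) hxpre, bCore_cons, if_neg h0]
      simp only [getAxLoop, if_neg h0, if_true]
      exact getAxLoop_true m x suf (0 + x) [x]
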